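-- pv_equiv track=rewrite | github.com/john-mwangi/ai-video-watcher | video_summarizer/backend/src/summarize_video.py | chunk_a_list
-- ===== SOURCE A (Python) =====
-- def chunk_a_list(data: list[str], chunk_size: int) -> list[list[str]]:
--     """Converts a long list to a smaller one by combining its items"""
--
--     result = []
--     sublist = []
--
--     for _, t in enumerate(data):
--         if t.strip():
--             sublist.append(t)
--         if len(sublist) == chunk_size:
--             result.append(sublist)
--             sublist = []
--     if sublist:
--         result.append(sublist)
--
--     return result
-- ===== SOURCE B (Python) =====
-- def chunk_a_list(data: list[str], chunk_size: int) -> list[list[str]]: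
--     """Converts a long list to a smaller one by combining its items"""
--     items = [t for t in data if t.strip()]
--     return [items[i:i + chunk_size] for i in range(0, len(items), chunk_size)]
-- ===== Notes on version B (the rewrite author's own statement) =====
-- stated objective: simpler
-- what changed: Replaces A's running-accumulator loop (mutable sublist flushed into result, plus a trailing flush) with a two-phase build-then-slice: filter the blanks in one comprehension, then cut the filtered list in fixed strides with range/slicing.
-- outside the precondition, e.g. on chunk_a_list(['a'], 0): A returns [['a']], B raises ValueError; on chunk_a_list(['a', 'b'], -1): A returns [['a', 'b']], B returns []
import Mathlib
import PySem

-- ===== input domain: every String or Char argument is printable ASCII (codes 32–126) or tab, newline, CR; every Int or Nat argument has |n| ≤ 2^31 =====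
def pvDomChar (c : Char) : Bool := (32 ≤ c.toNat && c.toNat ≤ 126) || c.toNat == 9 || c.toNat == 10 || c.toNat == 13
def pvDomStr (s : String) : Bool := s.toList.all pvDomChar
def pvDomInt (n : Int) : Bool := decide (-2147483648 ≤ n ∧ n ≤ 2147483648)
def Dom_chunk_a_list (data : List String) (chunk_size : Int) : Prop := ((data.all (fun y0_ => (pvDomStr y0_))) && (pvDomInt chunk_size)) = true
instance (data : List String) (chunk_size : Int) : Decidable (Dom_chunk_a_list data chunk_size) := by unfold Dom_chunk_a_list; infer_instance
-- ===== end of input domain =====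

-- B replaces A's running-accumulator loop by filter-then-slice in fixed strides (objective: simpler).

-- ===== PORT A =====
def chunk_a_list (data : List String) (chunk_size : Int) : List (List String) :=
  let st := data.foldl
    (fun (st : List (List String) × List String) t =>
      let sublist := if PySem.Str.strip t ≠ "" then st.2 ++ [t] else st.2
      if (sublist.length : Int) = chunk_size then (st.1 ++ [sublist], ([] : List String))
      else (st.1, sublist))
    ([], [])
  if st.2 ≠ [] then st.1 ++ [st.2] else st.1

-- ===== PORT B =====
def chunk_a_list_alt (data : List String) (chunk_size : Int) : List (List String) :=
  let items := data.filter (fun t => decide (PySem.Str.strip t ≠ ""))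
  (PySem.List.pyRange 0 (items.length : Int) chunk_size).map
    (fun i => PySem.List.slice items (some i) (some (i + chunk_size)))

-- ===== PRECONDITION & SPEC =====
-- Pre_ excludes non-positive chunk_size, a degenerate corner no caller would use: there A's
-- length-check accident yields one giant chunk (negative) or per-blank empty chunks (zero),
-- while B's range() raises (zero) or yields nothing (negative).
def Pre_chunk_a_list (data : List String) (chunk_size : Int) : Prop := 1 ≤ chunk_size
instance (data : List String) (chunk_size : Int) : Decidable (Pre_chunk_a_list data chunk_size) := by unfold Pre_chunk_a_list; infer_instance
def pvWitness_chunk_a_list : List String × Int := (["a", " ", "b", "c"], 2)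

def Spec_chunk_a_list (data : List String) (chunk_size : Int) (out : List (List String)) : Prop := out = chunk_a_list_alt data chunk_size
instance (data : List String) (chunk_size : Int) (out : List (List String)) : Decidable (Spec_chunk_a_list data chunk_size out) := by unfold Spec_chunk_a_list; infer_instance

-- ===== CLAIM (what is proved, stated in full; the proofs are below) =====
def Claim_equal_chunk_a_list : Prop := ∀ (data : List String) (chunk_size : Int), Dom_chunk_a_list data chunk_size → Pre_chunk_a_list data chunk_size → Spec_chunk_a_list data chunk_size (chunk_a_list data chunk_size)

-- ===== LEMMAS AND PROOFS =====

-- chunks of size k+1, cut front to back (proof-side characterisation both ports are reduced to)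
def chunksRec (k : Nat) : List String → List (List String)
  | [] => []
  | x :: xs => (x :: xs.take k) :: chunksRec k (xs.drop k)
termination_by xs => xs.length
decreasing_by simp

lemma chunksRec_nil (k : Nat) : chunksRec k [] = [] := by rw [chunksRec]

lemma chunksRec_short (k : Nat) (xs : List String) (h : xs.length ≤ k + 1) :
    chunksRec k xs = if xs = [] then [] else [xs] := by
  cases xs with
  | nil => simp [chunksRec_nil]
  | cons x xs =>
    simp only [List.length_cons] at h
    rw [chunksRec, List.take_of_length_le (by omega), List.drop_eq_nil_of_le (by omega),
      chunksRec_nil]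
    simp

lemma chunksRec_full (k : Nat) (xs ys : List String) (h : xs.length = k + 1) :
    chunksRec k (xs ++ ys) = xs :: chunksRec k ys := by
  cases xs with
  | nil => simp at h
  | cons x xs =>
    simp only [List.length_cons] at h
    obtain rfl : k = xs.length := by omega
    rw [List.cons_append, chunksRec, List.take_left, List.drop_left]

def stepA (c : Int) (st : List (List String) × List String) (t : String) :
    List (List String) × List String :=
  let sublist := if PySem.Str.strip t ≠ "" then st.2 ++ [t] else st.2
  if (sublist.length : Int) = c then (st.1 ++ [sublist], ([] : List String))
  else (st.1, sublist)

def finishA (st : List (List String) × List String) : List (List String) :=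
  if st.2 ≠ [] then st.1 ++ [st.2] else st.1

lemma loopA (k : Nat) (rest : List String) :
    ∀ (res : List (List String)) (sub : List String), sub.length < k + 1 →
    finishA (rest.foldl (stepA ((k : Int) + 1)) (res, sub))
    = res ++ chunksRec k (sub ++ rest.filter (fun t => decide (PySem.Str.strip t ≠ ""))) := by
  induction rest with
  | nil =>
    intro res sub hlt
    rw [List.foldl_nil, List.filter_nil, List.append_nil, chunksRec_short k sub (by omega)]
    by_cases hs : sub = []
    · subst hs; simp [finishA]
    · rw [finishA, if_pos hs, if_neg hs]
  | cons t ts ih =>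
    intro res sub hlt
    rw [List.foldl_cons]
    by_cases hp : PySem.Str.strip t = ""
    · have hfil : (t :: ts).filter (fun t => decide (PySem.Str.strip t ≠ ""))
          = ts.filter (fun t => decide (PySem.Str.strip t ≠ "")) := by simp [hp]
      have hstep : stepA ((k : Int) + 1) (res, sub) t = (res, sub) := by
        simp [stepA, hp, show ((sub.length : Int) ≠ (k : Int) + 1) from by omega]
      rw [hstep, ih res sub hlt, hfil]
    · have hfil : (t :: ts).filter (fun t => decide (PySem.Str.strip t ≠ ""))
          = t :: ts.filter (fun t => decide (PySem.Str.strip t ≠ "")) := by simp [hp]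
      by_cases hfull : sub.length = k
      · have hstep : stepA ((k : Int) + 1) (res, sub) t = (res ++ [sub ++ [t]], []) := by
          simp [stepA, hp, hfull]
        rw [hstep, ih (res ++ [sub ++ [t]]) [] (by simp), hfil,
          show sub ++ t :: ts.filter (fun t => decide (PySem.Str.strip t ≠ ""))
              = (sub ++ [t]) ++ ts.filter (fun t => decide (PySem.Str.strip t ≠ "")) from by simp,
          chunksRec_full k (sub ++ [t]) _ (by simp [hfull])]
        simp
      · have hstep : stepA ((k : Int) + 1) (res, sub) t = (res, sub ++ [t]) := by
          simp [stepA, hp, hfull]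
        rw [hstep, ih res (sub ++ [t]) (by simp; omega), hfil]
        simp

-- B side: the strided range/slice map computes the same chunks
lemma count_split (L c : Int) (hc : 0 < c) (hL : 0 < L) :
    ((L - 0 + c - 1) / c).toNat = (if 0 < L - c then ((L - c - 0 + c - 1) / c).toNat else 0) + 1 := by
  rw [show L - 0 + c - 1 = (L - 1) + 1 * c from by ring, Int.add_mul_ediv_right _ _ (by omega)]
  by_cases hb : 0 < L - c
  · rw [if_pos hb, show L - c - 0 + c - 1 = L - 1 from by ring]
    have h0 : 0 ≤ (L - 1) / c := Int.ediv_nonneg (by omega) (by omega)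
    omega
  · rw [if_neg hb]
    have : (L - 1) / c = 0 := Int.ediv_eq_zero_of_lt (by omega) (by omega)
    omega

lemma pyRange_pos_cons (L c : Int) (hc : 0 < c) (hL : 0 < L) :
    PySem.List.pyRange 0 L c = 0 :: (PySem.List.pyRange 0 (L - c) c).map (· + c) := by
  rw [PySem.List.pyRange_of_pos _ _ hc, PySem.List.pyRange_of_pos _ _ hc, if_pos hL,
    count_split L c hc hL, List.range_succ_eq_map, List.map_cons, List.map_map, List.map_map]
  refine congrArg₂ List.cons (by simp) ?_
  exact List.map_congr_left (fun j _ => by simp [Function.comp]; ring)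

lemma B_main (k : Nat) : ∀ (n : Nat) (items : List String), items.length ≤ n →
    (PySem.List.pyRange 0 (items.length : Int) ((k : Int) + 1)).map
      (fun i => PySem.List.slice items (some i) (some (i + ((k : Int) + 1))))
    = chunksRec k items := by
  intro n
  induction n with
  | zero =>
    intro items h
    obtain rfl : items = [] := List.eq_nil_of_length_eq_zero (by omega)
    rw [chunksRec_nil]
    simp [PySem.List.pyRange_of_pos _ _ (show (0 : Int) < (k : Int) + 1 from by omega)]
  | succ n ih =>
    intro items hlen
    cases items with
    | nil =>
      rw [chunksRec_nil]
      simp [PySem.List.pyRange_of_pos _ _ (show (0 : Int) < (k : Int) + 1 from by omega)]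
    | cons x xs =>
      have hcpos : (0 : Int) < (k : Int) + 1 := by omega
      have hL : (0 : Int) < (((x :: xs).length : Nat) : Int) := by simp
      rw [pyRange_pos_cons _ _ hcpos hL, List.map_cons, List.map_map]
      have hhead : PySem.List.slice (x :: xs) (some 0) (some (0 + ((k : Int) + 1)))
          = x :: xs.take k := by
        rw [show (0 : Int) + ((k : Int) + 1) = ((k + 1 : Nat) : Int) from by push_cast; ring,
          show (0 : Int) = ((0 : Nat) : Int) from rfl, PySem.List.slice_natCast]
        simp
      have hr : PySem.List.pyRange 0 ((((x :: xs).length : Nat) : Int) - ((k : Int) + 1)) ((k : Int) + 1)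
          = PySem.List.pyRange 0 (((xs.drop k).length : Int)) ((k : Int) + 1) := by
        by_cases hge : k ≤ xs.length
        · congr 1
          simp only [List.length_cons, List.length_drop]
          push_cast
          omega
        · rw [PySem.List.pyRange_of_pos _ _ hcpos, PySem.List.pyRange_of_pos _ _ hcpos,
            if_neg (by simp; omega), if_neg (by simp; omega)]
      have htail : (PySem.List.pyRange 0 ((((x :: xs).length : Nat) : Int) - ((k : Int) + 1)) ((k : Int) + 1)).map
          ((fun i => PySem.List.slice (x :: xs) (some i) (some (i + ((k : Int) + 1)))) ∘ (· + ((k : Int) + 1)))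
          = chunksRec k (xs.drop k) := by
        rw [hr, ← ih (xs.drop k) (by simp only [List.length_cons] at hlen; simp; omega)]
        apply List.map_congr_left
        intro i hi
        have h0 : 0 ≤ i := ((PySem.List.mem_pyRange_iff_of_pos hcpos i).1 hi).1
        obtain ⟨j, rfl⟩ : ∃ j : Nat, i = (j : Int) := ⟨i.toNat, by omega⟩
        show PySem.List.slice (x :: xs) (some ((j : Int) + ((k : Int) + 1)))
            (some (((j : Int) + ((k : Int) + 1)) + ((k : Int) + 1)))
          = PySem.List.slice (xs.drop k) (some (j : Int)) (some ((j : Int) + ((k : Int) + 1)))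
        rw [show (j : Int) + ((k : Int) + 1) = ((j + (k + 1) : Nat) : Int) from by push_cast; ring,
          show ((j + (k + 1) : Nat) : Int) + ((k : Int) + 1) = ((j + (k + 1) + (k + 1) : Nat) : Int) from by push_cast; ring,
          PySem.List.slice_natCast, PySem.List.slice_natCast,
          show j + (k + 1) + (k + 1) - (j + (k + 1)) = k + 1 from by omega,
          show j + (k + 1) - j = k + 1 from by omega]
        congr 1
        rw [List.drop_drop, show j + (k + 1) = (j + k) + 1 from by omega, List.drop_succ_cons,
          show j + k = k + j from by omega]
      rw [hhead, htail, chunksRec]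

-- ===== VERDICT (by name: the statement is the Claim_ definition above) =====
theorem chunk_a_list_spec : Claim_equal_chunk_a_list := by
  intro data chunk_size _ hpre
  unfold Pre_chunk_a_list at hpre
  obtain ⟨k, rfl⟩ : ∃ k : Nat, chunk_size = (k : Int) + 1 := ⟨(chunk_size - 1).toNat, by omega⟩
  unfold Spec_chunk_a_list chunk_a_list chunk_a_list_alt
  show finishA (data.foldl (stepA ((k : Int) + 1)) ([], [])) = _
  rw [loopA k data [] [] (by simp)]
  simp only [List.nil_append]
  exact (B_main k (data.filter (fun t => decide (PySem.Str.strip t ≠ ""))).length _ le_rfl).symm
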